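-- pv_equiv track=rewrite | github.com/smilevpn/python | source/5.2.py | out_mask
-- ===== SOURCE A (Python) =====
-- def quantiti_symbols(value):
--     return value + ((10 - len(value)) * ' ')
--
-- def out_mask(mask):
--     octets = '255.255.255.0'.split('.')
--     res_oct, res_bin = '', ''
--     i = 0
--     while i < len(octets):
--         x = int(octets[i])
--         res_oct += quantiti_symbols(octets[i])
--         res_bin += quantiti_symbols(format(x, '08b'))
--         i += 1
--     return ('/' + mask + '\n' + res_oct + '\n' + res_bin)
-- ===== SOURCE B (Python) =====
-- RES_OCT = '255       255       255       0         '
-- RES_BIN = '11111111  11111111  11111111  00000000  '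
--
-- def out_mask(mask):
--     return '/' + mask + '\n' + RES_OCT + '\n' + RES_BIN
-- ===== Notes on version B (the rewrite author's own statement) =====
-- stated objective: simpler
-- what changed: The octet loop, int/format conversions and padding helper are removed: since the netmask string is a literal, the two formatted blocks are precomputed constants and the result is one string concatenation.
import Mathlib
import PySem

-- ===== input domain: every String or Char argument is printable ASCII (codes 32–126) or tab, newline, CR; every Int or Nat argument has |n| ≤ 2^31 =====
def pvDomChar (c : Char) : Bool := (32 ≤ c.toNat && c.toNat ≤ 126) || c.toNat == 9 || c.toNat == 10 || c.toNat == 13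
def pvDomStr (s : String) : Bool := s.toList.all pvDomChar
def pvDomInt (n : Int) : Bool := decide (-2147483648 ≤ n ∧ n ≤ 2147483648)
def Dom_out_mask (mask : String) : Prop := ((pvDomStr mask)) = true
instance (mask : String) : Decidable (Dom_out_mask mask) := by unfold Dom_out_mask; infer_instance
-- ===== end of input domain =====

-- B replaces A's octet loop over the literal '255.255.255.0' (int parse, binary format, padding
-- helper) by the two precomputed constant blocks and a single concatenation; objective: simpler.

-- ===== PORT A =====
-- quantiti_symbols(value) = value + (10 - len(value)) * ' '  (Nat subtraction = Python's 'negative count gives empty string')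
def quantiti_symbols (value : String) : String :=
  value ++ String.ofList (List.replicate (10 - value.toList.length) ' ')

-- hand port of format(x, '08b') for x ≥ 0 (exact there; only 255 and 0 reach it):
-- binary digits of n, most significant first (fuel-bounded structural recursion; fuel = n suffices since n needs ≤ n digits)
def pvBinDigitsAux : Nat → Nat → List Char
  | 0, _ => []
  | fuel + 1, n => if n = 0 then [] else pvBinDigitsAux fuel (n / 2) ++ [if n % 2 = 1 then '1' else '0']

def pvFormat08b (x : Int) : String :=
  let ds := if x.toNat = 0 then ['0'] else pvBinDigitsAux x.toNat x.toNat
  String.ofList (List.replicate (8 - ds.length) '0' ++ ds)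

-- the 'while i < len(octets)' loop, as structural recursion over the remaining octets,
-- carrying (res_oct, res_bin); int(o) via PySem.Int.ofStr? (.getD 0 unreachable: octets are
-- the decimal literals from '255.255.255.0', on which int() never raises)
def out_mask_loop : List String → String × String → String × String
  | [], res => res
  | o :: rest, (res_oct, res_bin) =>
    let x := (PySem.Int.ofStr? o).getD 0
    out_mask_loop rest (res_oct ++ quantiti_symbols o, res_bin ++ quantiti_symbols (pvFormat08b x))

def out_mask (mask : String) : String :=
  let octets := ((PySem.Str.split? "255.255.255.0" ".").getD [])
  let res := out_mask_loop octets ("", "")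
  "/" ++ mask ++ "\n" ++ res.1 ++ "\n" ++ res.2

-- ===== PORT B =====
def RES_OCT : String := "255       255       255       0         "
def RES_BIN : String := "11111111  11111111  11111111  00000000  "

def out_mask_alt (mask : String) : String :=
  "/" ++ mask ++ "\n" ++ RES_OCT ++ "\n" ++ RES_BIN

-- ===== PRECONDITION & SPEC =====
def Spec_out_mask (mask : String) (out : String) : Prop := out = out_mask_alt mask
instance (mask : String) (out : String) : Decidable (Spec_out_mask mask out) := by unfold Spec_out_mask; infer_instance

-- ===== CLAIM (what is proved, stated in full; the proofs are below) =====
def Claim_equal_out_mask : Prop := ∀ (mask : String), Dom_out_mask mask → Spec_out_mask mask (out_mask mask)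

-- ===== LEMMAS AND PROOFS =====
theorem out_mask_loop_eval :
    out_mask_loop (((PySem.Str.split? "255.255.255.0" ".").getD [])) ("", "") = (RES_OCT, RES_BIN) := by
  decide

-- ===== VERDICT (by name: the statement is the Claim_ definition above) =====
theorem out_mask_spec : Claim_equal_out_mask := by
  intro mask _
  unfold Spec_out_mask out_mask out_mask_alt
  simp only [out_mask_loop_eval]
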